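-- pv_equiv track=rewrite | github.com/kmg733/CodingTest | BoJ/python/난이도별로 풀기/SILVER 3/1972_놀라운 문자열.py | surprisingWord
-- ===== SOURCE A (Python) =====
-- def surprisingWord(word):
--     isSp = True
--
--     # i는 d-쌍(거리)을 의미함
--     for i in range(1, len(word)):
--         dWord = []
--
--         # j는 부분 문자열을 의미함
--         for j in range(len(word) - i):
--             # "ZGBG" 라는 문자열이 주어지면 순서대로
--             # i = 1 "ZG", "GB", "BG"
--             # i = 2 "ZB", "GG"
--             # i = 3 "ZG"
--             dWord.append(word[j] + word[j + i])
--         for j in range(len(dWord) - 1):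
--             if dWord[j] in dWord[j + 1:]:
--                 isSp = False
--     return isSp
-- ===== SOURCE B (Python) =====
-- def surprisingWord(word):
--     n = len(word)
--     for i in range(1, n):
--         codes = sorted(ord(word[j]) * 1114112 + ord(word[j + i]) for j in range(n - i))
--         for a, b in zip(codes, codes[1:]):
--             if a == b:
--                 return False
--     return True
-- ===== Notes on version B (the rewrite author's own statement) =====
-- stated objective: faster
-- what changed: Per distance i, A builds the pair list and then for each position scans the whole remaining tail with a slice membership test; B encodes each pair as one integer, sorts those integers, and does a single adjacent-equality scan over the sorted list, so duplicate detection is sort-then-linear-scan instead of repeated tail scans.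
import Mathlib
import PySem

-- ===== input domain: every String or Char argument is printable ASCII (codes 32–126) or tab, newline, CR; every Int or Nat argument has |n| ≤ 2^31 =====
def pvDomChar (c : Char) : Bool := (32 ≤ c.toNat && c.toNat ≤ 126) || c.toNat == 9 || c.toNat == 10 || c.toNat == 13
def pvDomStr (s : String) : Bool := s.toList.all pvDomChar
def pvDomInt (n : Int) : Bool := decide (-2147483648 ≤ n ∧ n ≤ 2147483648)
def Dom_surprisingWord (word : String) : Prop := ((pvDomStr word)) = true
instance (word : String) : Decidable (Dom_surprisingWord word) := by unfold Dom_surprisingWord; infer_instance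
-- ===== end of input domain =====

-- B replaces A's per-distance repeated tail-membership scans by sort-then-adjacent-scan:
-- each pair is encoded as one integer, the integers are sorted, and one linear pass
-- checks for equal neighbours (objective: faster).

-- ===== PORT A =====
-- Python's 2-char string word[j] + word[j+i] is represented by the pair of its two characters
-- (exact: two such concatenations are equal iff the character pairs are equal).
def surprisingWord (word : String) : Bool :=
  let w := word.toList
  let n : Int := w.length
  (PySem.List.pyRange 1 n 1).foldl (fun isSp i =>
    let dWord : List (Char × Char) :=
      (PySem.List.pyRange 0 (n - i) 1).foldl (fun acc j =>
        acc ++ [(PySem.List.pyGetD w j ' ', PySem.List.pyGetD w (j + i) ' ')]) []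
    (PySem.List.pyRange 0 ((dWord.length : Int) - 1) 1).foldl (fun isSp j =>
      if PySem.List.pyGetD dWord j (' ', ' ') ∈ PySem.List.slice dWord (some (j + 1)) none
      then false else isSp) isSp) true

-- ===== PORT B =====
-- Source B's generator 'ord(word[j]) * 1114112 + ord(word[j + i]) for j in range(n - i)'
def swCodes (w : List Char) (i : Nat) : List Int :=
  (List.range (w.length - i)).map
    (fun j => ((w.getD j ' ').toNat : Int) * 1114112 + ((w.getD (j + i) ' ').toNat : Int))

-- inner loop of Source B: 'for a, b in zip(codes, codes[1:]): if a == b: return False'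
-- (zip of a list with its tail visits exactly the adjacent pairs)
def swAdjDup : List Int → Bool
  | a :: b :: rest => if a = b then true else swAdjDup (b :: rest)
  | _ => false

-- outer loop of Source B with the early 'return False'
def swOuterB (w : List Char) (i : Nat) : Bool :=
  if i < w.length then
    if swAdjDup (PySem.List.sorted (swCodes w i) (fun x => x) false) then false
    else swOuterB w (i + 1)
  else true
termination_by w.length - i

def surprisingWord_alt (word : String) : Bool :=
  swOuterB word.toList 1

-- ===== PRECONDITION & SPEC =====
def Spec_surprisingWord (word : String) (out : Bool) : Prop := out = surprisingWord_alt word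
instance (word : String) (out : Bool) : Decidable (Spec_surprisingWord word out) := by unfold Spec_surprisingWord; infer_instance

-- ===== CLAIM (what is proved, stated in full; the proofs are below) =====
def Claim_equal_surprisingWord : Prop := ∀ (word : String), Dom_surprisingWord word → Spec_surprisingWord word (surprisingWord word)

-- ===== LEMMAS AND PROOFS =====

-- a foldl that can only switch the flag to false computes 'b && no element satisfies p'
theorem fold_if_false {α : Type} (L : List α) (p : α → Prop) [DecidablePred p] (b : Bool) :
    L.foldl (fun acc x => if p x then false else acc) b
      = (b && !(L.any fun x => decide (p x))) := by
  induction L generalizing b with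
  | nil => simp
  | cons x xs ih =>
    rw [List.foldl_cons]
    by_cases h : p x
    · rw [if_pos h, ih]; simp [h]
    · rw [if_neg h, ih]; simp [h]

-- a foldl whose step is pointwise 'b && c x' on the list's members computes 'b && L.all c'
theorem foldl_band_of_mem {α : Type} (L : List α) (f : Bool → α → Bool) (c : α → Bool)
    (h : ∀ b x, x ∈ L → f b x = (b && c x)) (b : Bool) :
    L.foldl f b = (b && L.all c) := by
  induction L generalizing b with
  | nil => simp
  | cons x xs ih =>
    rw [List.foldl_cons, h b x List.mem_cons_self,
      ih (fun b y hy => h b y (List.mem_cons_of_mem _ hy))]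
    cases b <;> simp

-- index-based duplicate scan equals ¬Nodup
theorem any_dup (d : List (Char × Char)) (dflt : Char × Char) :
    ((List.range (d.length - 1)).any fun j => decide (d.getD j dflt ∈ d.drop (j + 1)))
      = !decide d.Nodup := by
  rw [Bool.eq_iff_iff]
  simp only [List.any_eq_true, List.mem_range, decide_eq_true_eq, Bool.not_eq_true',
    decide_eq_false_iff_not, List.Nodup]
  rw [List.pairwise_iff_getElem]
  constructor
  · rintro ⟨j, hj, hmem⟩ hnd
    obtain ⟨m, hm, hval⟩ := List.mem_iff_getElem.mp hmem
    have hjlen : j < d.length := by omega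
    have hmlen : j + 1 + m < d.length := by rw [List.length_drop] at hm; omega
    rw [List.getElem_drop] at hval
    have hge : d.getD j dflt = d[j] := by
      rw [List.getD_eq_getElem?_getD, List.getElem?_eq_getElem hjlen, Option.getD_some]
    exact hnd j (j + 1 + m) hjlen hmlen (by omega) (hval ▸ hge).symm
  · intro hnd
    push Not at hnd
    obtain ⟨i, j, hi, hj, hij, heq⟩ := hnd
    refine ⟨i, by omega, ?_⟩
    have hge : d.getD i dflt = d[i] := by
      rw [List.getD_eq_getElem?_getD, List.getElem?_eq_getElem hi, Option.getD_some]
    rw [hge, heq]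
    rw [List.mem_iff_getElem]
    refine ⟨j - (i + 1), by rw [List.length_drop]; omega, ?_⟩
    rw [List.getElem_drop]
    simp only [show i + 1 + (j - (i + 1)) = j from by omega]

-- on a ≤-sorted list the adjacent-equality scan detects exactly ¬Nodup
theorem swAdjDup_eq_not_nodup (l : List Int) (hs : l.Pairwise (· ≤ ·)) :
    swAdjDup l = !decide l.Nodup := by
  induction l with
  | nil => simp [swAdjDup]
  | cons a t ih =>
    cases t with
    | nil => simp [swAdjDup]
    | cons b r =>
      rw [List.pairwise_cons] at hs
      obtain ⟨hab, hrest⟩ := hs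
      by_cases h : a = b
      · subst h
        simp [swAdjDup, List.nodup_cons]
      · rw [swAdjDup, if_neg h, ih hrest]
        have hnm : a ∉ b :: r := by
          intro hm
          rcases List.mem_cons.mp hm with rfl | hm
          · exact h rfl
          · have h1 : a ≤ b := hab b List.mem_cons_self
            have h2 : b ≤ a := (List.pairwise_cons.mp hrest).1 a hm
            exact h (le_antisymm h1 h2)
        simp [List.nodup_cons, hnm]

-- the pair list at distance k, as A builds it (index map over the range)
def pairList (w : List Char) (k : Nat) : List (Char × Char) :=
  (List.range (w.length - k)).map (fun j => (w.getD j ' ', w.getD (j + k) ' '))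

-- the zip list at distance k is that index-map pair list
theorem zip_eq_map_range (w : List Char) (k : Nat) :
    w.zip (w.drop k) = pairList w k := by
  apply List.ext_getElem
  · simp only [pairList, List.length_zip, List.length_drop, List.length_map, List.length_range]
    omega
  · intro j h1 h2
    have hj : j < w.length - k := by simpa [pairList] using h2
    have hjw : j < w.length := by omega
    have hjk : j + k < w.length := by omega
    simp [pairList, List.getElem_zip, List.getD_eq_getElem?_getD,
      List.getElem?_eq_getElem hjw, List.getElem?_eq_getElem hjk, Nat.add_comm k j]

-- the integer encoding of a character pair is injective
theorem encode_injective :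
    Function.Injective (fun p : Char × Char =>
      ((p.1.toNat : Int) * 1114112 + (p.2.toNat : Int))) := by
  have hlt : ∀ c : Char, c.toNat < 1114112 := by
    intro c
    have h := c.valid
    show c.val.toNat < 1114112
    rcases h with h | ⟨hv1, hv2⟩ <;> omega
  have heq : ∀ a b : Char, a.toNat = b.toNat → a = b := by
    intro a b h
    apply Char.ext
    exact UInt32.toNat_inj.mp h
  rintro ⟨a1, a2⟩ ⟨b1, b2⟩ h
  simp only at h
  have h1 := hlt a1; have h2 := hlt a2; have h3 := hlt b1; have h4 := hlt b2
  have e1 : a1.toNat = b1.toNat := by omega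
  have e2 : a2.toNat = b2.toNat := by omega
  rw [heq a1 b1 e1, heq a2 b2 e2]

-- codes = the pair list encoded
theorem swCodes_eq_map (w : List Char) (k : Nat) :
    swCodes w k = (pairList w k).map
      (fun p : Char × Char => ((p.1.toNat : Int) * 1114112 + (p.2.toNat : Int))) := by
  simp [swCodes, pairList, List.map_map, Function.comp_def]

-- one iteration of B's outer loop tests exactly the Nodup of the distance-k zip list
theorem stepB_eq (w : List Char) (k : Nat) :
    swAdjDup (PySem.List.sorted (swCodes w k) (fun x => x) false)
      = !decide ((w.zip (w.drop k)).Nodup) := by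
  rw [swAdjDup_eq_not_nodup _ (by
    have := PySem.List.sorted_pairwise (xs := swCodes w k) (key := fun x => x)
    simpa using this)]
  congr 1
  rw [Bool.eq_iff_iff]
  simp only [decide_eq_true_eq]
  rw [(PySem.List.sorted_perm (swCodes w k) (fun x => x) false).nodup_iff,
    swCodes_eq_map, List.nodup_map_iff encode_injective, zip_eq_map_range]

theorem swOuterB_eq (w : List Char) (i : Nat) :
    swOuterB w i = decide (∀ k, i ≤ k → k < w.length → (w.zip (w.drop k)).Nodup) := by
  unfold swOuterB
  by_cases h : i < w.length
  · rw [if_pos h, stepB_eq, swOuterB_eq w (i + 1)]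
    by_cases hd : (w.zip (w.drop i)).Nodup
    · rw [if_neg (by simp [hd])]
      simp only [decide_eq_decide]
      constructor
      · intro hall k hk hkl
        rcases Nat.eq_or_lt_of_le hk with rfl | hlt
        · exact hd
        · exact hall k hlt hkl
      · intro hall k hk hkl; exact hall k (Nat.le_of_succ_le hk) hkl
    · rw [if_pos (by simp [hd])]
      refine (decide_eq_false fun hall => ?_).symm
      exact hd (hall i le_rfl h)
  · rw [if_neg h]
    exact (decide_eq_true fun k hk hkl => absurd hkl (by omega)).symm
termination_by w.length - i

-- one iteration of A's outer loop (at distance i = k with 1 ≤ k < |w|) computes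
-- 'b && the pairs at distance k are all distinct'
theorem stepA_eq (w : List Char) (k : Nat) (_hk1 : 1 ≤ k) (hk2 : k < w.length) (b : Bool) :
    (let dWord : List (Char × Char) :=
      (PySem.List.pyRange 0 ((w.length : Int) - (k : Int)) 1).foldl (fun acc j =>
        acc ++ [(PySem.List.pyGetD w j ' ', PySem.List.pyGetD w (j + (k : Int)) ' ')]) []
     (PySem.List.pyRange 0 ((dWord.length : Int) - 1) 1).foldl (fun isSp j =>
      if PySem.List.pyGetD dWord j (' ', ' ') ∈ PySem.List.slice dWord (some (j + 1)) none
      then false else isSp) b)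
      = (b && decide ((w.zip (w.drop k)).Nodup)) := by
  have hcast : (w.length : Int) - (k : Int) = ((w.length - k : Nat) : Int) := by
    push_cast [Nat.cast_sub hk2.le]; ring
  have hdw : (PySem.List.pyRange 0 ((w.length : Int) - (k : Int)) 1).foldl (fun acc j =>
        acc ++ [(PySem.List.pyGetD w j ' ', PySem.List.pyGetD w (j + (k : Int)) ' ')]) []
      = pairList w k := by
    rw [hcast, PySem.List.foldl_append_singleton_eq_map, PySem.List.pyRange_zero_natCast,
      List.map_map, List.nil_append, pairList]
    apply List.map_congr_left
    intro j _
    simp only [Function.comp_def, ← Nat.cast_add, PySem.List.pyGetD_natCast]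
  simp only [hdw]
  set d : List (Char × Char) := pairList w k with hd
  have hdlen : d.length = w.length - k := by simp [hd, pairList]
  have hm1 : 1 ≤ w.length - k := by omega
  have hcast2 : ((d.length : Int) - 1) = ((d.length - 1 : Nat) : Int) := by
    rw [hdlen]; push_cast [Nat.cast_sub hm1]; ring
  rw [fold_if_false, hcast2, PySem.List.pyRange_zero_natCast, List.any_map]
  have hfun : ((fun (x : Int) => decide (PySem.List.pyGetD d x (' ', ' ')
        ∈ PySem.List.slice d (some (x + 1)) none)) ∘ (fun (k : Nat) => (k : Int)))
      = (fun (j : Nat) => decide (d.getD j (' ', ' ') ∈ d.drop (j + 1))) := by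
    funext j
    simp only [Function.comp_def]
    rw [show ((j : Nat) : Int) + 1 = (((j + 1 : Nat)) : Int) by push_cast; ring,
      PySem.List.slice_from_natCast, PySem.List.pyGetD_natCast]
  rw [hfun]
  simp only [any_dup, Bool.not_not]
  rw [zip_eq_map_range]

-- ===== VERDICT (by name: the statement is the Claim_ definition above) =====
theorem surprisingWord_spec : Claim_equal_surprisingWord := by
  intro word _
  unfold Spec_surprisingWord surprisingWord surprisingWord_alt
  set w := word.toList with hw
  rw [swOuterB_eq]
  rw [foldl_band_of_mem _ _
    (fun i => decide ((w.zip (w.drop i.toNat)).Nodup))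
    (fun b i hi => by
      obtain ⟨h1, h2⟩ := PySem.List.mem_pyRange_one.mp hi
      have hk1 : 1 ≤ i.toNat := by omega
      have hk2 : i.toNat < w.length := by omega
      have := stepA_eq w i.toNat hk1 hk2 b
      rw [show ((i.toNat : Nat) : Int) = i by omega] at this
      exact this)]
  simp only [Bool.true_and]
  rw [Bool.eq_iff_iff]
  simp only [List.all_eq_true, decide_eq_true_eq]
  constructor
  · intro hall k hk hkl
    have hm : ((k : Nat) : Int) ∈ PySem.List.pyRange 1 (w.length : Int) 1 :=
      PySem.List.mem_pyRange_one.mpr (by omega)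
    have := hall _ hm
    simpa using this
  · intro hall i hi
    obtain ⟨h1, h2⟩ := PySem.List.mem_pyRange_one.mp hi
    exact hall i.toNat (by omega) (by omega)
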